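-- pv_equiv track=rewrite | github.com/italiaricarica-arch/italy | server.py | check_operator_match
-- ===== SOURCE A (Python) =====
-- OPERATOR_PREFIXES = {
--     "TIM": ["330", "331", "333", "334", "335", "336", "337", "338", "339", "360", "361", "362", "363", "366", "368"],
--     "Vodafone": ["340", "341", "342", "343", "344", "345", "346", "347", "348", "349", "383"],
--     "WindTre": ["320", "322", "323", "324", "325", "326", "327", "328", "329", "380", "388", "389", "390", "391", "392", "393", "397"],
--     "Iliad": ["351", "352", "353"],
--     "Very": ["370", "371"],
--     "Lycamobile": ["373"],
--     "CMLink": ["350"],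
--     "DailyTelecom": ["375"],
--     "ho.": ["377", "378"],
--     "Kena": ["354", "355"],
-- }
--
-- def check_operator_match(phone, operator):
--     prefix3 = phone[:3]
--     matched_ops = []
--     for op, prefixes in OPERATOR_PREFIXES.items():
--         if prefix3 in prefixes:
--             matched_ops.append(op)
--     if not matched_ops:
--         return True, None
--     if operator in matched_ops:
--         return True, None
--     return False, matched_ops[0]
-- ===== SOURCE B (Python) =====
-- def _operator_for_suffix(n):
--     if n in (30, 31) or 33 <= n <= 39 or n in (60, 61, 62, 63, 66, 68):
--         return "TIM"
--     if 40 <= n <= 49 or n == 83: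
--         return "Vodafone"
--     if n == 20 or 22 <= n <= 29 or n == 80 or n in (88, 89) or 90 <= n <= 93 or n == 97:
--         return "WindTre"
--     if 51 <= n <= 53:
--         return "Iliad"
--     if n in (70, 71):
--         return "Very"
--     if n == 73:
--         return "Lycamobile"
--     if n == 50:
--         return "CMLink"
--     if n == 75:
--         return "DailyTelecom"
--     if n in (77, 78):
--         return "ho."
--     if n in (54, 55):
--         return "Kena"
--     return None
--
-- def check_operator_match(phone, operator):
--     op = None
--     if len(phone) >= 3 and phone[0] == '3' and phone[1].isdigit() and phone[2].isdigit():
--         n = (ord(phone[1]) - 48) * 10 + (ord(phone[2]) - 48)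
--         op = _operator_for_suffix(n)
--     if op is None or op == operator:
--         return True, None
--     return False, op
-- ===== Notes on version B (the rewrite author's own statement) =====
-- stated objective: alternative
-- what changed: Replaces A's per-call scan over every operator's prefix list (string membership tests) with a purely arithmetic classification: check the leading '3', turn the next two digit characters into a number 0-99, and pick the operator by an if/elif chain of numeric range tests; no prefix data is traversed at call time.
import Mathlib
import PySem

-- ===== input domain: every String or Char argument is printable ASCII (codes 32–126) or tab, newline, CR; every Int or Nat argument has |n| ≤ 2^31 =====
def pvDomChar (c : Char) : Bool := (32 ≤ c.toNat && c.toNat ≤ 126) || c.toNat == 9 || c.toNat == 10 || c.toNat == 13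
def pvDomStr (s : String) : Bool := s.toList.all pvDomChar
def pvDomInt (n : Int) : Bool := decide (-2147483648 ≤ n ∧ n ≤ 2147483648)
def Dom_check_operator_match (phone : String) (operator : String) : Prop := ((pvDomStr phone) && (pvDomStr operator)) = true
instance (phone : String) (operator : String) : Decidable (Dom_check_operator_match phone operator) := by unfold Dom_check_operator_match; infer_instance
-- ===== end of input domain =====

-- B replaces A's per-call scan over all operators' prefix lists by a purely arithmetic
-- classification of the two digits after a leading '3'; return values proved identical.

-- ===== PORT A =====
def OPERATOR_PREFIXES : List (String × List String) :=
  [("TIM", ["330", "331", "333", "334", "335", "336", "337", "338", "339", "360", "361", "362", "363", "366", "368"]),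
   ("Vodafone", ["340", "341", "342", "343", "344", "345", "346", "347", "348", "349", "383"]),
   ("WindTre", ["320", "322", "323", "324", "325", "326", "327", "328", "329", "380", "388", "389", "390", "391", "392", "393", "397"]),
   ("Iliad", ["351", "352", "353"]),
   ("Very", ["370", "371"]),
   ("Lycamobile", ["373"]),
   ("CMLink", ["350"]),
   ("DailyTelecom", ["375"]),
   ("ho.", ["377", "378"]),
   ("Kena", ["354", "355"])]

def check_operator_match (phone : String) (operator : String) : Bool × Option String :=
  let prefix3 := PySem.Str.slice phone none (some 3)
  let matched_ops := OPERATOR_PREFIXES.foldl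
    (fun acc g => if g.2.contains prefix3 then acc ++ [g.1] else acc) []
  if matched_ops.isEmpty then (true, none)
  else if matched_ops.contains operator then (true, none)
  else (false, matched_ops.head?)

-- ===== PORT B =====
-- the if/elif chain of _operator_for_suffix: numeric ranges on the two digits after '3'
def operator_for_suffix (n : Nat) : Option String :=
  if n == 30 || n == 31 || (33 ≤ n && n ≤ 39) || n == 60 || n == 61 || n == 62 || n == 63 || n == 66 || n == 68 then some "TIM"
  else if (40 ≤ n && n ≤ 49) || n == 83 then some "Vodafone"
  else if n == 20 || (22 ≤ n && n ≤ 29) || n == 80 || n == 88 || n == 89 || (90 ≤ n && n ≤ 93) || n == 97 then some "WindTre"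
  else if 51 ≤ n && n ≤ 53 then some "Iliad"
  else if n == 70 || n == 71 then some "Very"
  else if n == 73 then some "Lycamobile"
  else if n == 50 then some "CMLink"
  else if n == 75 then some "DailyTelecom"
  else if n == 77 || n == 78 then some "ho."
  else if n == 54 || n == 55 then some "Kena"
  else none

-- 'len(phone) >= 3' plus the three indexings ported as one pattern match on the char list;
-- str.isdigit on one char is PySem.Chars.isdigit, ord(c)-48 is c.toNat-48 (exact on ASCII)
def check_operator_match_alt (phone : String) (operator : String) : Bool × Option String :=
  let op : Option String :=
    match phone.toList with
    | c0 :: c1 :: c2 :: _ =>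
      if c0 = '3' ∧ PySem.Chars.isdigit c1 ∧ PySem.Chars.isdigit c2 then
        operator_for_suffix ((c1.toNat - 48) * 10 + (c2.toNat - 48))
      else none
    | _ => none
  match op with
  | none => (true, none)
  | some op => if op == operator then (true, none) else (false, some op)

-- ===== PRECONDITION & SPEC =====
def Spec_check_operator_match (phone : String) (operator : String) (out : Bool × Option String) : Prop := out = check_operator_match_alt phone operator
instance (phone : String) (operator : String) (out : Bool × Option String) : Decidable (Spec_check_operator_match phone operator out) := by unfold Spec_check_operator_match; infer_instance

-- ===== CLAIM (what is proved, stated in full; the proofs are below) =====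
def Claim_equal_check_operator_match : Prop := ∀ (phone : String) (operator : String), Dom_check_operator_match phone operator → Spec_check_operator_match phone operator (check_operator_match phone operator)

-- ===== LEMMAS AND PROOFS =====

-- B's classifier of the first three characters, as a named function
def classify (cs : List Char) : Option String :=
  match cs with
  | c0 :: c1 :: c2 :: _ =>
    if c0 = '3' ∧ PySem.Chars.isdigit c1 ∧ PySem.Chars.isdigit c2 then
      operator_for_suffix ((c1.toNat - 48) * 10 + (c2.toNat - 48))
    else none
  | _ => none

theorem alt_eq (phone operator : String) :
    check_operator_match_alt phone operator
      = match classify phone.toList with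
        | none => (true, none)
        | some op => if op == operator then (true, none) else (false, some op) := rfl

-- the operators whose prefix list contains p, in order
def matchedF (L : List (String × List String)) (p : String) : List String :=
  (L.filter (fun g => g.2.contains p)).map Prod.fst

theorem foldl_matched (p : String) (L : List (String × List String)) :
    ∀ acc, L.foldl (fun acc g => if g.2.contains p then acc ++ [g.1] else acc) acc
      = acc ++ matchedF L p := by
  induction L with
  | nil => intro acc; simp [matchedF]
  | cons g L ih =>
    intro acc
    rw [List.foldl_cons]
    by_cases h : p ∈ g.2
    · rw [if_pos (by simpa using h), ih]
      simp [matchedF, h]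
    · rw [if_neg (by simpa using h), ih]
      simp [matchedF, h]

def DisjGroups (L : List (String × List String)) : Prop :=
  L.Pairwise (fun a b => a.2.all (fun x => !b.2.contains x) = true)

theorem matchedF_nil_of_not_mem (L : List (String × List String)) (p : String)
    (h : ∀ g ∈ L, p ∉ g.2) : matchedF L p = [] := by
  simp only [matchedF, List.map_eq_nil_iff, List.filter_eq_nil_iff]
  intro g hg
  simpa using h g hg

theorem matchedF_short (L : List (String × List String)) (p : String)
    (hd : DisjGroups L) : (matchedF L p).length ≤ 1 := by
  induction L with
  | nil => simp [matchedF]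
  | cons g L ih =>
    rcases List.pairwise_cons.mp hd with ⟨hg, hL⟩
    by_cases h : p ∈ g.2
    · have hnil : matchedF L p = [] := by
        apply matchedF_nil_of_not_mem
        intro b hb
        have hb' := List.all_eq_true.mp (hg b hb) p h
        simpa using hb'
      have hcons : matchedF (g :: L) p = g.1 :: matchedF L p := by
        simp [matchedF, h]
      rw [hcons, hnil]
      simp
    · simpa [matchedF, List.filter_cons, h] using ih hL

theorem disj_concrete : DisjGroups OPERATOR_PREFIXES := by
  unfold DisjGroups OPERATOR_PREFIXES
  decide

-- every prefix literal is '3' followed by two ASCII digits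
def goodKey (l : List Char) : Bool :=
  match l with
  | [c0, c1, c2] => decide (c0 = '3') && (PySem.Chars.isdigit c1 && PySem.Chars.isdigit c2)
  | _ => false

theorem keys_good : ∀ g ∈ OPERATOR_PREFIXES, ∀ q ∈ g.2, goodKey q.toList = true := by
  decide

-- the 100-case core: on a genuine '3'+two-digits prefix, A's scan and B's table agree
theorem key100 : ∀ a : Fin 10, ∀ b : Fin 10,
    (matchedF OPERATOR_PREFIXES (String.ofList ['3', Char.ofNat (48 + a.val), Char.ofNat (48 + b.val)])).head?
      = operator_for_suffix (a.val * 10 + b.val) := by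
  decide

theorem digit_toNat {c : Char} (h : PySem.Chars.isdigit c = true) :
    48 ≤ c.toNat ∧ c.toNat ≤ 57 := by
  unfold PySem.Chars.isdigit at h
  obtain ⟨h1, h2⟩ := Bool.and_eq_true_iff.mp h
  exact ⟨UInt32.le_iff_toNat_le.mp (Char.le_def.mp (of_decide_eq_true h1)),
         UInt32.le_iff_toNat_le.mp (Char.le_def.mp (of_decide_eq_true h2))⟩

-- bridging lemma: A's matched-list head on phone[:3] equals B's arithmetic classification
theorem bridge (p : String) (cs : List Char) (hp : p.toList = cs.take 3) :
    (matchedF OPERATOR_PREFIXES p).head? = classify cs := by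
  have hnot : goodKey (cs.take 3) = false → (matchedF OPERATOR_PREFIXES p).head? = none := by
    intro hng
    have hnil : matchedF OPERATOR_PREFIXES p = [] := by
      apply matchedF_nil_of_not_mem
      intro g hg hmem
      have hq := keys_good g hg p hmem
      rw [hp] at hq
      rw [hq] at hng
      exact Bool.true_eq_false.mp hng
    simp [hnil]
  cases cs with
  | nil => rw [hnot (by simp [goodKey])]; simp [classify]
  | cons c0 t0 =>
    cases t0 with
    | nil => rw [hnot (by simp [goodKey])]; simp [classify]
    | cons c1 t1 =>
      cases t1 with
      | nil => rw [hnot (by simp [goodKey])]; simp [classify]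
      | cons c2 rest =>
        have htake : (c0 :: c1 :: c2 :: rest).take 3 = [c0, c1, c2] := by simp
        by_cases hg : c0 = '3' ∧ PySem.Chars.isdigit c1 ∧ PySem.Chars.isdigit c2
        · obtain ⟨h0, hd1, hd2⟩ := hg
          have hcl : classify (c0 :: c1 :: c2 :: rest)
              = operator_for_suffix ((c1.toNat - 48) * 10 + (c2.toNat - 48)) := by
            simp [classify, h0, hd1, hd2]
          rw [hcl]
          obtain ⟨h1l, h1u⟩ := digit_toNat hd1
          obtain ⟨h2l, h2u⟩ := digit_toNat hd2
          have ha : c1.toNat - 48 < 10 := by omega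
          have hb : c2.toNat - 48 < 10 := by omega
          have hkey := key100 ⟨c1.toNat - 48, ha⟩ ⟨c2.toNat - 48, hb⟩
          have h48a : 48 + (c1.toNat - 48) = c1.toNat := by omega
          have h48b : 48 + (c2.toNat - 48) = c2.toNat := by omega
          rw [h48a, h48b, Char.ofNat_toNat, Char.ofNat_toNat] at hkey
          have hps : p = String.ofList ['3', c1, c2] := by
            rw [← show p.toList = ['3', c1, c2] by rw [hp, htake, h0]]
            simp
          rw [hps]
          exact hkey
        · have hcl : classify (c0 :: c1 :: c2 :: rest) = none := by
            simp only [classify, if_neg hg]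
          rw [hcl]
          apply hnot
          rw [htake]
          have hgk : goodKey [c0, c1, c2]
              = (decide (c0 = '3') && (PySem.Chars.isdigit c1 && PySem.Chars.isdigit c2)) := rfl
          rw [hgk]
          by_cases h0 : c0 = '3'
          · by_cases h1 : PySem.Chars.isdigit c1 = true
            · by_cases h2 : PySem.Chars.isdigit c2 = true
              · exact absurd ⟨h0, h1, h2⟩ hg
              · have h2' : PySem.Chars.isdigit c2 = false := by
                  revert h2; cases PySem.Chars.isdigit c2 <;> simp
                simp [h2']
            · have h1' : PySem.Chars.isdigit c1 = false := by
                revert h1; cases PySem.Chars.isdigit c1 <;> simp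
              simp [h1']
          · simp [h0]

-- ===== VERDICT (by name: the statement is the Claim_ definition above) =====
theorem check_operator_match_spec : Claim_equal_check_operator_match := by
  intro phone operator _
  unfold Spec_check_operator_match check_operator_match
  rw [alt_eq]
  have hslice : (PySem.Str.slice phone none (some 3)).toList = phone.toList.take 3 := by
    simp [PySem.Str.slice]
    rw [PySem.List.slice_to phone.toList (by norm_num : (0:Int) ≤ 3)]
    rfl
  have hb := bridge (PySem.Str.slice phone none (some 3)) phone.toList hslice
  simp only [foldl_matched, List.nil_append]
  have hlen := matchedF_short OPERATOR_PREFIXES (PySem.Str.slice phone none (some 3)) disj_concrete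
  rcases hm : matchedF OPERATOR_PREFIXES (PySem.Str.slice phone none (some 3)) with _ | ⟨op, rest⟩
  · rw [hm] at hb
    simp only [List.head?] at hb
    rw [← hb]
    simp
  · rw [hm] at hb hlen
    have hrest : rest = [] := by
      cases rest with
      | nil => rfl
      | cons a l => simp at hlen
    subst hrest
    simp only [List.head?] at hb
    rw [← hb]
    by_cases h : operator = op
    · simp [h]
    · simp [h, Ne.symm h]
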